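-- pv_equiv track=rewrite | github.com/lh-rubz/med_BE | utils/password_validator.py | has_sequential_numbers
-- ===== SOURCE A (Python) =====
-- def has_sequential_numbers(password):
--     """
--     Check if password contains sequential numbers (ascending or descending).
--
--     Args:
--         password (str): The password to check
--
--     Returns:
--         bool: True if sequential numbers found, False otherwise
--     """
--     # Extract all digits from password
--     digits = ''.join(c for c in password if c.isdigit())
--
--     # Check for sequences of 3 or more consecutive digits
--     if len(digits) < 3:
--         return False
--
--     for i in range(len(digits) - 2):
--         # Get three consecutive digits
--         num1 = int(digits[i])
--         num2 = int(digits[i + 1])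
--         num3 = int(digits[i + 2])
--
--         # Check if they form an ascending sequence (e.g., 123, 456)
--         if num2 == num1 + 1 and num3 == num2 + 1:
--             return True
--
--         # Check if they form a descending sequence (e.g., 321, 654)
--         if num2 == num1 - 1 and num3 == num2 - 1:
--             return True
--
--     return False
-- ===== SOURCE B (Python) =====
-- def has_sequential_numbers(password):
--     """Single pass with running ascending/descending run-length counters."""
--     digits = [ord(c) - 48 for c in password if c.isdigit()]
--     if not digits:
--         return False
--     prev = digits[0]
--     asc = desc = 1
--     for cur in digits[1:]:
--         asc = asc + 1 if cur == prev + 1 else 1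
--         desc = desc + 1 if cur == prev - 1 else 1
--         if asc >= 3 or desc >= 3:
--             return True
--         prev = cur
--     return False
-- ===== Notes on version B (the rewrite author's own statement) =====
-- stated objective: simpler
-- what changed: Replaced the overlapping triple-by-index re-checks with a single stateful pass over consecutive digit pairs maintaining ascending/descending run-length counters that trigger at 3.
import Mathlib
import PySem

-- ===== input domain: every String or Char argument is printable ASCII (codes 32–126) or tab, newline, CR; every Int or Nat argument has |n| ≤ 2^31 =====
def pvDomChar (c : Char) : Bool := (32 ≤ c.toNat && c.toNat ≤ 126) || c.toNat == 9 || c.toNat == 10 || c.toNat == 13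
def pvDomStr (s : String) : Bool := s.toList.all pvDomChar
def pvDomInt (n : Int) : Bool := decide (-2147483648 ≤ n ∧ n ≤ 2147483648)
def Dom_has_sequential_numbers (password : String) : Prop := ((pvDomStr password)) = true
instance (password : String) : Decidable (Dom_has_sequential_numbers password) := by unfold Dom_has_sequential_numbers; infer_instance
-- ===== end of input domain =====

-- B replaces A's indexed overlapping-triple checks by one stateful pass keeping
-- ascending/descending run-length counters (objective: simpler; same O(n) cost).

-- ===== PORT A =====
-- int(c) for a single digit character c ('0'..'9'); exact there (only isdigit chars reach it).
def pyDigitInt (c : Char) : Int := (c.toNat : Int) - 48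

def has_sequential_numbers (password : String) : Bool :=
  -- digits = ''.join(c for c in password if c.isdigit())
  let digits : List Char := password.toList.filter PySem.Chars.isdigit
  if digits.length < 3 then false
  else
    -- for i in range(len(digits) - 2): … return True  ≡  any over the range
    (PySem.List.pyRange 0 ((digits.length : Int) - 2) 1).any (fun i =>
      let num1 := pyDigitInt (PySem.List.pyGetD digits i ' ')
      let num2 := pyDigitInt (PySem.List.pyGetD digits (i + 1) ' ')
      let num3 := pyDigitInt (PySem.List.pyGetD digits (i + 2) ' ')
      (num2 == num1 + 1 && num3 == num2 + 1) || (num2 == num1 - 1 && num3 == num2 - 1))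

-- ===== PORT B =====
-- the for-loop of Source B: state (prev, asc, desc), early return True when a counter reaches 3
def altLoop (prev asc desc : Int) : List Int → Bool
  | [] => false
  | cur :: rest =>
    let asc' := if cur == prev + 1 then asc + 1 else 1
    let desc' := if cur == prev - 1 then desc + 1 else 1
    if 3 ≤ asc' || 3 ≤ desc' then true else altLoop cur asc' desc' rest

def has_sequential_numbers_alt (password : String) : Bool :=
  -- digits = [ord(c) - 48 for c in password if c.isdigit()]
  let digits : List Int :=
    (password.toList.filter PySem.Chars.isdigit).map (fun c => (c.toNat : Int) - 48)
  match digits with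
  | [] => false
  | d :: rest => altLoop d 1 1 rest

-- ===== PRECONDITION & SPEC =====
def Spec_has_sequential_numbers (password : String) (out : Bool) : Prop := out = has_sequential_numbers_alt password
instance (password : String) (out : Bool) : Decidable (Spec_has_sequential_numbers password out) := by unfold Spec_has_sequential_numbers; infer_instance

-- ===== CLAIM (what is proved, stated in full; the proofs are below) =====
def Claim_equal_has_sequential_numbers : Prop := ∀ (password : String), Dom_has_sequential_numbers password → Spec_has_sequential_numbers password (has_sequential_numbers password)

-- ===== LEMMAS AND PROOFS =====

-- common reference form: a structural scan for a monotone (±1) triple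
def hasTriple : List Int → Bool
  | a :: b :: c :: rest =>
      (b == a + 1 && c == b + 1) || (b == a - 1 && c == b - 1) || hasTriple (b :: c :: rest)
  | _ => false

def pairAsc (prev : Int) : List Int → Bool
  | c :: _ => c == prev + 1
  | [] => false

def pairDesc (prev : Int) : List Int → Bool
  | c :: _ => c == prev - 1
  | [] => false

-- A's loop body at index i of the digit list
def tripB (l : List Char) (i : Nat) : Bool :=
  (pyDigitInt (l.getD (i + 1) ' ') == pyDigitInt (l.getD i ' ') + 1 &&
    pyDigitInt (l.getD (i + 2) ' ') == pyDigitInt (l.getD (i + 1) ' ') + 1) ||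
  (pyDigitInt (l.getD (i + 1) ' ') == pyDigitInt (l.getD i ' ') - 1 &&
    pyDigitInt (l.getD (i + 2) ' ') == pyDigitInt (l.getD (i + 1) ' ') - 1)

theorem hasTriple_cons_cons (a b : Int) (l : List Int) :
    hasTriple (a :: b :: l) =
      ((b == a + 1 && pairAsc b l) || (b == a - 1 && pairDesc b l) || hasTriple (b :: l)) := by
  cases l with
  | nil => simp [hasTriple, pairAsc, pairDesc]
  | cons c r => simp [hasTriple, pairAsc, pairDesc]

-- invariant of B's loop: asc = 2 records that the previous step was an ascent (desc likewise)
theorem altLoop_eq (l : List Int) : ∀ (prev asc desc : Int),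
    (asc = 1 ∨ asc = 2) → (desc = 1 ∨ desc = 2) →
    altLoop prev asc desc l =
      (hasTriple (prev :: l) || (decide (asc = 2) && pairAsc prev l)
        || (decide (desc = 2) && pairDesc prev l)) := by
  induction l with
  | nil =>
      intro prev asc desc _ _
      simp [altLoop, hasTriple, pairAsc, pairDesc]
  | cons cur rest ih =>
      intro prev asc desc ha hd
      rw [hasTriple_cons_cons]
      have hne : ¬ ((prev : Int) + 1 = prev - 1) := by omega
      have hne' : ¬ ((prev : Int) - 1 = prev + 1) := by omega
      have bne : ((prev : Int) + 1 == prev - 1) = false := by simpa using hne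
      have bne' : ((prev : Int) - 1 == prev + 1) = false := by simpa using hne'
      by_cases h1 : cur = prev + 1 <;> by_cases h2 : cur = prev - 1
      · omega
      · subst h1
        rcases ha with ha | ha <;> rcases hd with hd | hd <;>
          simp [altLoop, bne, ha, hd, pairAsc, pairDesc,
            ih (prev + 1) 2 1 (Or.inr rfl) (Or.inl rfl), Bool.or_comm]
      · subst h2
        rcases ha with ha | ha <;> rcases hd with hd | hd <;>
          simp [altLoop, bne', ha, hd, pairAsc, pairDesc,
            ih (prev - 1) 1 2 (Or.inl rfl) (Or.inr rfl), Bool.or_comm]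
      · have b1 : (cur == prev + 1) = false := by simpa using h1
        have b2 : (cur == prev - 1) = false := by simpa using h2
        rcases ha with ha | ha <;> rcases hd with hd | hd <;>
          simp [altLoop, b1, b2, ha, hd, pairAsc, pairDesc,
            ih cur 1 1 (Or.inl rfl) (Or.inl rfl), Bool.or_comm]

theorem alt_eq_hasTriple (ds : List Int) :
    (match ds with | [] => false | d :: rest => altLoop d 1 1 rest) = hasTriple ds := by
  cases ds with
  | nil => simp [hasTriple]
  | cons d rest => simp [altLoop_eq rest d 1 1 (Or.inl rfl) (Or.inl rfl)]

-- A's indexed any over range(len - 2) is the structural triple scan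
theorem any_range_trip (l : List Char) :
    (List.range (l.length - 2)).any (tripB l) = hasTriple (l.map pyDigitInt) := by
  induction l with
  | nil => simp [hasTriple]
  | cons a tl ih =>
      cases tl with
      | nil => simp [hasTriple]
      | cons b tl' =>
        cases tl' with
        | nil => simp [hasTriple]
        | cons c rest =>
          rw [show (a :: b :: c :: rest).length - 2 = rest.length + 1 from by simp,
            List.range_succ_eq_map, List.any_cons, List.any_map]
          have hshift : tripB (a :: b :: c :: rest) ∘ Nat.succ = tripB (b :: c :: rest) := by
            funext i
            simp [tripB, Nat.succ_eq_add_one, Nat.add_assoc, Nat.add_comm, Nat.add_left_comm]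
          rw [show (b :: c :: rest).length - 2 = rest.length from by simp] at ih
          rw [hshift, ih]
          simp [tripB, hasTriple]

theorem hasTriple_short (ds : List Int) (h : ds.length < 3) : hasTriple ds = false := by
  match ds, h with
  | [], _ => rfl
  | [_], _ => rfl
  | [_, _], _ => rfl

-- ===== VERDICT (by name: the statement is the Claim_ definition above) =====
theorem has_sequential_numbers_spec : Claim_equal_has_sequential_numbers := by
  intro password _
  unfold Spec_has_sequential_numbers has_sequential_numbers has_sequential_numbers_alt
  rw [show (fun c : Char => ((c.toNat : Int) - 48)) = pyDigitInt from rfl]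
  set digits : List Char := password.toList.filter PySem.Chars.isdigit with hdig
  rw [alt_eq_hasTriple]
  by_cases hlen : digits.length < 3
  · simp only [hlen, if_true]
    exact (hasTriple_short _ (by simpa using hlen)).symm
  · simp only [hlen, if_false]
    rw [← any_range_trip digits, PySem.List.pyRange_one,
      show ((digits.length : Int) - 2 - 0).toNat = digits.length - 2 from by omega,
      List.any_map]
    refine List.any_congr rfl fun i => ?_
    have g0 : PySem.List.pyGetD digits (0 + (i : Int)) ' ' = digits.getD i ' ' := by
      rw [show (0 + (i : Int)) = (i : Int) from by omega, PySem.List.pyGetD_natCast]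
    have g1 : PySem.List.pyGetD digits (0 + (i : Int) + 1) ' ' = digits.getD (i + 1) ' ' := by
      rw [show (0 + (i : Int) + 1) = ((i + 1 : Nat) : Int) from by push_cast; omega,
        PySem.List.pyGetD_natCast]
    have g2 : PySem.List.pyGetD digits (0 + (i : Int) + 2) ' ' = digits.getD (i + 2) ' ' := by
      rw [show (0 + (i : Int) + 2) = ((i + 2 : Nat) : Int) from by push_cast; omega,
        PySem.List.pyGetD_natCast]
    simp only [Function.comp_def, g0, g1, g2, tripB]
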